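-- pv_equiv track=rewrite | github.com/Atmmk369/Joyus | database.py | calculate_xp_for_level
-- ===== SOURCE A (Python) =====
-- def calculate_xp_for_level(level: int) -> int:
--     """Calculate total XP needed for a level"""
--     if level == 1:
--         return 0
--
--     total_xp = 0
--     for lvl in range(2, level + 1):
--         if lvl <= 16:
--             total_xp += 60
--         elif lvl <= 36:
--             total_xp += 90
--         else:
--             total_xp += 120
--
--     return total_xp
-- ===== SOURCE B (Python) =====
-- def calculate_xp_for_level(level: int) -> int:
--     """Calculate total XP needed for a level (closed form over the three brackets)"""
--     if level <= 1:
--         return 0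
--     if level <= 16:
--         return 60 * (level - 1)
--     if level <= 36:
--         return 900 + 90 * (level - 16)
--     return 2700 + 120 * (level - 36)
-- ===== Notes on version B (the rewrite author's own statement) =====
-- stated objective: faster
-- what changed: Replaced the per-level accumulation loop with a closed-form piecewise sum over the three XP brackets.
import Mathlib
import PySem

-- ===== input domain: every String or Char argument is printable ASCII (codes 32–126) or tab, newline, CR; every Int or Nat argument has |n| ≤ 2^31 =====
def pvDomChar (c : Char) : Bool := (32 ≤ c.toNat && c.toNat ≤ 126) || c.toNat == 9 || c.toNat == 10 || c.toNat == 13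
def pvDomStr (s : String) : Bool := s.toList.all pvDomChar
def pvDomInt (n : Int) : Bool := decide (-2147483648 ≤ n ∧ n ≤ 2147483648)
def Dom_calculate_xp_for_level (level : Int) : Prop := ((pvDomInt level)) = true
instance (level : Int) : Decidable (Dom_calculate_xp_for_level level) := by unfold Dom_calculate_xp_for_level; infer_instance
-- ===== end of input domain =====

-- ===== PORT A =====
-- literal port: early return for level == 1, then a fold over range(2, level+1)
def pvStep (acc lvl : Int) : Int :=
  if lvl ≤ 16 then acc + 60 else if lvl ≤ 36 then acc + 90 else acc + 120

def calculate_xp_for_level (level : Int) : Int :=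
  if level = 1 then 0
  else (PySem.List.pyRange 2 (level + 1) 1).foldl pvStep 0

-- ===== PORT B =====
-- B: O(1) closed-form piecewise sum over the three XP brackets (A is O(level))
def calculate_xp_for_level_alt (level : Int) : Int :=
  if level ≤ 1 then 0
  else if level ≤ 16 then 60 * (level - 1)
  else if level ≤ 36 then 900 + 90 * (level - 16)
  else 2700 + 120 * (level - 36)

-- ===== PRECONDITION & SPEC =====
def Spec_calculate_xp_for_level (level : Int) (out : Int) : Prop := out = calculate_xp_for_level_alt level
instance (level : Int) (out : Int) : Decidable (Spec_calculate_xp_for_level level out) := by unfold Spec_calculate_xp_for_level; infer_instance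

-- ===== CLAIM (what is proved, stated in full; the proofs are below) =====
def Claim_equal_calculate_xp_for_level : Prop := ∀ (level : Int), Dom_calculate_xp_for_level level → Spec_calculate_xp_for_level level (calculate_xp_for_level level)

-- ===== LEMMAS AND PROOFS =====

-- ===== VERDICT (by name: the statement is the Claim_ definition above) =====
lemma pv_key (n : Nat) :
    (PySem.List.pyRange 2 ((1 : Int) + n + 1) 1).foldl pvStep 0
      = calculate_xp_for_level_alt (1 + n) := by
  induction n with
  | zero =>
      rw [PySem.List.pyRange_one_eq_nil (by norm_num)]
      simp [calculate_xp_for_level_alt]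
  | succ k ih =>
      have h2 : (2 : Int) ≤ 1 + (k : Int) + 1 := by omega
      have : ((1 : Int) + (k + 1 : Nat) + 1) = (1 + (k : Int) + 1) + 1 := by push_cast; ring
      rw [this, PySem.List.pyRange_one_succ_right h2, List.foldl_append, ih]
      have hk : ((1 : Int) + (k + 1 : Nat)) = 1 + (k : Int) + 1 := by push_cast; ring
      rw [hk]
      simp only [List.foldl, pvStep, calculate_xp_for_level_alt]
      split_ifs <;> omega

theorem calculate_xp_for_level_spec : Claim_equal_calculate_xp_for_level := by
  intro level _
  unfold Spec_calculate_xp_for_level calculate_xp_for_level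
  by_cases h1 : level = 1
  · simp [h1, calculate_xp_for_level_alt]
  · rw [if_neg h1]
    by_cases hle : level ≤ 1
    · rw [PySem.List.pyRange_one_eq_nil (by omega)]
      simp [calculate_xp_for_level_alt, hle]
    · have hn : level = 1 + ((level - 1).toNat : Int) := by omega
      rw [hn]
      exact pv_key (level - 1).toNat
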